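-- pv_equiv track=rewrite | github.com/petejadhav/jalebi | jalebi/jalebi.py | jalebiSplit
-- ===== SOURCE A (Python) =====
-- charGroups = [(65,90),(97,122),(48,57)]
--
-- def getCharGroup(ch):
--     code = ord(ch)
--     for idx,grp in enumerate(charGroups):
--         if code >= grp[0] and code <= grp[1]:
--             return idx
--     return -1#code
--
-- def jalebiSplit(raw_str):
--     output = []
--     substring = ""
--     last_group = -2
--     for i in raw_str:
--         curr_group = getCharGroup(i)
--         if curr_group != last_group:
--             # change
--             if len(substring) == 1 and last_group == 0 and curr_group == 1:
--                 last_group=curr_group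
--                 substring += i
--                 continue
--             last_group=curr_group
--             output.append(substring)
--             substring = ""
--         substring += i
--     output.append(substring)
--     return output[1:]
-- ===== SOURCE B (Python) =====
-- charGroups = [(65,90),(97,122),(48,57)]
--
-- def getCharGroup(ch):
--     code = ord(ch)
--     for idx,grp in enumerate(charGroups):
--         if code >= grp[0] and code <= grp[1]:
--             return idx
--     return -1
--
-- def jalebiSplit(raw_str):
--     # phase 1: cut the string into maximal same-class runs (span scan with slices)
--     runs = []
--     i, n = 0, len(raw_str)
--     while i < n:
--         g = getCharGroup(raw_str[i])
--         j = i + 1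
--         while j < n and getCharGroup(raw_str[j]) == g:
--             j += 1
--         runs.append((g, raw_str[i:j]))
--         i = j
--     # phase 2: merge a single-uppercase run with an immediately following lowercase run
--     out = []
--     k = 0
--     while k < len(runs):
--         g, t = runs[k]
--         if g == 0 and len(t) == 1 and k + 1 < len(runs) and runs[k+1][0] == 1:
--             out.append(t + runs[k+1][1])
--             k += 2
--         else:
--             out.append(t)
--             k += 1
--     return out
-- ===== Notes on version B (the rewrite author's own statement) =====
-- stated objective: alternative
-- what changed: Replaced A's one-pass accumulate-and-flush state machine (with a merge-continue special case and a leading-sentinel element dropped by output[1:]) by a two-phase algorithm: first cut the string into maximal same-class runs with an index/span scan, then a merge pass that joins a single-uppercase run with an immediately following lowercase run.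
import Mathlib
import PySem

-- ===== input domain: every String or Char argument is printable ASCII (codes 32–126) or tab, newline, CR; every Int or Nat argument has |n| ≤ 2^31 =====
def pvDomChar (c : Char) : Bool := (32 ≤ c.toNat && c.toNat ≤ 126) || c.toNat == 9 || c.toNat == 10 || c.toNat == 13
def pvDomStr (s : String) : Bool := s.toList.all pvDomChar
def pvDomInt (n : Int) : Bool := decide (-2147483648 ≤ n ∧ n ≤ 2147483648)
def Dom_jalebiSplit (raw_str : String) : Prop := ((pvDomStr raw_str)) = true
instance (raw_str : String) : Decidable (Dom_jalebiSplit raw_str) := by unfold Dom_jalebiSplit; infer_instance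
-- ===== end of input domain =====

-- B replaces A's one-pass accumulate-and-flush state machine by a two-phase
-- split-into-runs-then-merge pass (objective: alternative decomposition, same cost).

-- ===== PORT A =====
def charGroupsA : List (Int × Int) := [(65, 90), (97, 122), (48, 57)]

def findGroupA (code : Int) : Int → List (Int × Int) → Int
  | _, [] => -1
  | idx, grp :: rest =>
    if grp.1 ≤ code ∧ code ≤ grp.2 then idx else findGroupA code (idx + 1) rest

def getCharGroupA (ch : Char) : Int :=
  findGroupA (ch.toNat : Int) 0 charGroupsA

-- one loop body of A's for-loop; state = (output, substring, last_group)
def stepA (st : List String × List Char × Int) (i : Char) : List String × List Char × Int :=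
  let output := st.1
  let substring := st.2.1
  let last_group := st.2.2
  let curr_group := getCharGroupA i
  if curr_group ≠ last_group then
    if substring.length = 1 ∧ last_group = 0 ∧ curr_group = 1 then
      (output, substring ++ [i], curr_group)
    else
      (output ++ [String.mk substring], [i], curr_group)
  else
    (output, substring ++ [i], last_group)

def jalebiSplit (raw_str : String) : List String :=
  let r := raw_str.toList.foldl stepA ([], [], (-2 : Int))
  (r.1 ++ [String.mk r.2.1]).drop 1

-- ===== PORT B =====
def charGroupsB : List (Int × Int) := [(65, 90), (97, 122), (48, 57)]

def findGroupB (code : Int) : Int → List (Int × Int) → Int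
  | _, [] => -1
  | idx, grp :: rest =>
    if grp.1 ≤ code ∧ code ≤ grp.2 then idx else findGroupB code (idx + 1) rest

def getCharGroupB (ch : Char) : Int :=
  findGroupB (ch.toNat : Int) 0 charGroupsB

-- phase 1: cut into maximal same-class runs (the span scan of Source B)
def runsOf : List Char → List (Int × List Char)
  | [] => []
  | c :: cs =>
    (getCharGroupB c, c :: cs.takeWhile (fun d => getCharGroupB d == getCharGroupB c)) ::
      runsOf (cs.dropWhile (fun d => getCharGroupB d == getCharGroupB c))
termination_by l => l.length
decreasing_by
  simp only [List.length_cons]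
  exact Nat.lt_succ_of_le (List.length_dropWhile_le _ _)

-- phase 2: merge a single-uppercase run with an immediately following lowercase run
def mergeRuns : List (Int × List Char) → List String
  | [] => []
  | (g, t) :: rest =>
    if g = 0 ∧ t.length = 1 then
      match rest with
      | (g2, t2) :: rest2 =>
        if g2 = 1 then String.mk (t ++ t2) :: mergeRuns rest2
        else String.mk t :: mergeRuns ((g2, t2) :: rest2)
      | [] => [String.mk t]
    else String.mk t :: mergeRuns rest
termination_by l => l.length
decreasing_by
  all_goals simp only [List.length_cons]
  all_goals omega

def jalebiSplit_alt (raw_str : String) : List String :=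
  mergeRuns (runsOf raw_str.toList)

-- ===== PRECONDITION & SPEC =====
def Spec_jalebiSplit (raw_str : String) (out : List String) : Prop := out = jalebiSplit_alt raw_str
instance (raw_str : String) (out : List String) : Decidable (Spec_jalebiSplit raw_str out) := by unfold Spec_jalebiSplit; infer_instance

-- ===== CLAIM (what is proved, stated in full; the proofs are below) =====
def Claim_equal_jalebiSplit : Prop := ∀ (raw_str : String), Dom_jalebiSplit raw_str → Spec_jalebiSplit raw_str (jalebiSplit raw_str)

-- ===== LEMMAS AND PROOFS =====

theorem gBA : getCharGroupB = getCharGroupA := by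
  funext c
  simp [getCharGroupA, getCharGroupB, findGroupA, findGroupB, charGroupsA, charGroupsB]

theorem runsOf_nil : runsOf [] = [] := by conv_lhs => rw [runsOf.eq_def]

theorem runsOf_cons (c : Char) (cs : List Char) : runsOf (c :: cs) =
    (getCharGroupB c, c :: cs.takeWhile (fun d => getCharGroupB d == getCharGroupB c)) ::
      runsOf (cs.dropWhile (fun d => getCharGroupB d == getCharGroupB c)) := by
  conv_lhs => rw [runsOf.eq_def]

theorem gA_ne_m2 (c : Char) : getCharGroupA c ≠ -2 := by
  unfold getCharGroupA charGroupsA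
  simp only [findGroupA]
  split_ifs <;> decide

theorem mergeRuns_nil : mergeRuns [] = [] := by conv_lhs => rw [mergeRuns.eq_def]

theorem mergeRuns_single (g : Int) (t : List Char) :
    mergeRuns [(g, t)] = [String.mk t] := by
  simp only [mergeRuns]
  split_ifs <;> rfl

theorem mergeRuns_cons_cons (g : Int) (t : List Char) (g2 : Int) (t2 : List Char)
    (rest : List (Int × List Char)) :
    mergeRuns ((g, t) :: (g2, t2) :: rest) =
      if t.length = 1 ∧ g = 0 ∧ g2 = 1 then String.mk (t ++ t2) :: mergeRuns rest
      else String.mk t :: mergeRuns ((g2, t2) :: rest) := by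
  simp only [mergeRuns]
  by_cases h1 : g = 0 ∧ t.length = 1
  · simp only [if_pos h1]
    by_cases h2 : g2 = 1
    · simp [h1, h2]
    · simp [h1, h2]
  · have : ¬ (t.length = 1 ∧ g = 0 ∧ g2 = 1) := by tauto
    simp [h1, this]

theorem dropWhile_head_false {p : Char → Bool} :
    ∀ (l : List Char) (x : Char) (xs : List Char), l.dropWhile p = x :: xs → p x = false := by
  intro l
  induction l with
  | nil => intro x xs h; simp [List.dropWhile] at h
  | cons a l ih =>
    intro x xs h
    by_cases hp : p a
    · simp [List.dropWhile, hp] at h; exact ih x xs h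
    · simp [List.dropWhile, hp] at h
      rcases h with ⟨h1, _⟩
      subst h1
      exact Bool.eq_false_iff.mpr hp

theorem run_accum :
    ∀ (t : List Char) (out : List String) (sub : List Char) (g : Int),
      (∀ d ∈ t, getCharGroupA d = g) →
      t.foldl stepA (out, sub, g) = (out, sub ++ t, g) := by
  intro t
  induction t with
  | nil => intro out sub g _; simp
  | cons d t ih =>
    intro out sub g h
    have hd : getCharGroupA d = g := h d (List.mem_cons_self)
    have hstep : stepA (out, sub, g) d = (out, sub ++ [d], g) := by
      simp [stepA, hd]
    simp only [List.foldl_cons, hstep]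
    rw [ih out (sub ++ [d]) g (fun e he => h e (List.mem_cons_of_mem _ he))]
    simp

theorem takeWhile_group {g : Int} {cs : List Char} :
    ∀ d ∈ cs.takeWhile (fun d => getCharGroupB d == g), getCharGroupA d = g := by
  intro d hd
  have := List.mem_takeWhile_imp hd
  rw [gBA] at this
  exact (beq_iff_eq).mp this

theorem mainL :
    ∀ (n : Nat) (cs : List Char) (out : List String) (sub : List Char) (g : Int),
      cs.length ≤ n →
      (∀ c cs', cs = c :: cs' → getCharGroupA c ≠ g) →
      (let r := cs.foldl stepA (out, sub, g)
       r.1 ++ [String.mk r.2.1]) = out ++ mergeRuns ((g, sub) :: runsOf cs) := by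
  intro n
  induction n with
  | zero =>
    intro cs out sub g hn _
    have : cs = [] := List.eq_nil_of_length_eq_zero (Nat.le_zero.mp hn)
    subst this
    simp [runsOf_nil, mergeRuns_single]
  | succ n ih =>
    intro cs out sub g hn hb
    cases cs with
    | nil => simp [runsOf_nil, mergeRuns_single]
    | cons c cs' =>
      have hgg : getCharGroupA c ≠ g := hb c cs' rfl
      set g' := getCharGroupA c with hg'
      set p : Char → Bool := fun d => getCharGroupB d == g' with hp
      have hsplit : cs' = cs'.takeWhile p ++ cs'.dropWhile p :=
        (List.takeWhile_append_dropWhile).symm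
      have hruns : runsOf (c :: cs') =
          (g', c :: cs'.takeWhile p) :: runsOf (cs'.dropWhile p) := by
        rw [runsOf_cons]
        simp only [gBA, hp, ← hg']
      have hboundary : ∀ x xs, cs'.dropWhile p = x :: xs → getCharGroupA x ≠ g' := by
        intro x xs hx
        have := dropWhile_head_false cs' x xs hx
        simp only [hp, gBA, beq_eq_false_iff_ne, ne_eq] at this
        exact this
      have hlen : (cs'.dropWhile p).length ≤ n := by
        have h1 : (cs'.dropWhile p).length ≤ cs'.length := List.length_dropWhile_le _ _
        have h2 : cs'.length ≤ n := by
          simpa [List.length_cons, Nat.succ_le_succ_iff] using hn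
        omega
      by_cases hm : sub.length = 1 ∧ g = 0 ∧ g' = 1
      · -- merge branch
        have hstep : stepA (out, sub, g) c = (out, sub ++ [c], g') := by
          simp [stepA, ← hg', hm]
        have hfold : (c :: cs').foldl stepA (out, sub, g) =
            (cs'.dropWhile p).foldl stepA (out, (sub ++ [c]) ++ cs'.takeWhile p, g') := by
          conv_lhs => rw [List.foldl_cons, hstep]
          conv_lhs => rw [show cs' = cs'.takeWhile p ++ cs'.dropWhile p from hsplit]
          rw [List.foldl_append]
          rw [run_accum (cs'.takeWhile p) out (sub ++ [c]) g' takeWhile_group]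
        have hboundary1 : ∀ x xs, cs'.dropWhile p = x :: xs → getCharGroupA x ≠ (1 : Int) := by
          intro x xs hx
          have := hboundary x xs hx
          rw [hm.2.2] at this
          exact this
        have hg1 : g' = 1 := hm.2.2
        have := ih (cs'.dropWhile p) out ((sub ++ [c]) ++ cs'.takeWhile p) 1 hlen hboundary1
        simp only [hfold, hg1]
        rw [this]
        rw [hruns, mergeRuns_cons_cons]
        have hcond : sub.length = 1 ∧ g = 0 ∧ g' = 1 := hm
        rw [if_pos hcond]
        have : mergeRuns ((1, (sub ++ [c]) ++ cs'.takeWhile p) :: runsOf (cs'.dropWhile p)) =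
            String.mk ((sub ++ [c]) ++ cs'.takeWhile p) :: mergeRuns (runsOf (cs'.dropWhile p)) := by
          cases hrest : runsOf (cs'.dropWhile p) with
          | nil => simp [mergeRuns_single, mergeRuns_nil]
          | cons r rs =>
            obtain ⟨g2, t2⟩ := r
            rw [mergeRuns_cons_cons]
            simp
        rw [this]
        simp
      · -- flush branch
        have hstep : stepA (out, sub, g) c = (out ++ [String.mk sub], [c], g') := by
          simp only [stepA, ← hg']
          rw [if_pos hgg, if_neg hm]
        have hfold : (c :: cs').foldl stepA (out, sub, g) =
            (cs'.dropWhile p).foldl stepA (out ++ [String.mk sub], [c] ++ cs'.takeWhile p, g') := by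
          conv_lhs => rw [List.foldl_cons, hstep]
          conv_lhs => rw [show cs' = cs'.takeWhile p ++ cs'.dropWhile p from hsplit]
          rw [List.foldl_append]
          rw [run_accum (cs'.takeWhile p) (out ++ [String.mk sub]) [c] g' takeWhile_group]
        have := ih (cs'.dropWhile p) (out ++ [String.mk sub]) ([c] ++ cs'.takeWhile p) g' hlen hboundary
        simp only [hfold]
        rw [this]
        rw [hruns, mergeRuns_cons_cons, if_neg hm]
        simp

-- ===== VERDICT (by name: the statement is the Claim_ definition above) =====
theorem jalebiSplit_spec : Claim_equal_jalebiSplit := by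
  intro raw_str _
  unfold Spec_jalebiSplit jalebiSplit jalebiSplit_alt
  cases hcs : raw_str.toList with
  | nil => simp [runsOf, mergeRuns]
  | cons c cs' =>
    set g' := getCharGroupA c with hg'
    set p : Char → Bool := fun d => getCharGroupB d == g' with hp
    have hstep : stepA ([], [], (-2 : Int)) c = ([String.mk []], [c], g') := by
      simp only [stepA, ← hg']
      rw [if_pos (gA_ne_m2 c), if_neg (by simp)]
      simp
    have hsplit : cs' = cs'.takeWhile p ++ cs'.dropWhile p :=
      (List.takeWhile_append_dropWhile).symm
    have hboundary : ∀ x xs, cs'.dropWhile p = x :: xs → getCharGroupA x ≠ g' := by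
      intro x xs hx
      have := dropWhile_head_false cs' x xs hx
      simp only [hp, gBA, beq_eq_false_iff_ne, ne_eq] at this
      exact this
    have hfold : (c :: cs').foldl stepA ([], [], (-2 : Int)) =
        (cs'.dropWhile p).foldl stepA ([String.mk []], [c] ++ cs'.takeWhile p, g') := by
      conv_lhs => rw [List.foldl_cons, hstep]
      conv_lhs => rw [show cs' = cs'.takeWhile p ++ cs'.dropWhile p from hsplit]
      rw [List.foldl_append]
      rw [run_accum (cs'.takeWhile p) [String.mk []] [c] g' takeWhile_group]
    have hmain := mainL (cs'.dropWhile p).length (cs'.dropWhile p)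
      [String.mk []] ([c] ++ cs'.takeWhile p) g' (le_refl _) hboundary
    have hruns : runsOf (c :: cs') =
        (g', c :: cs'.takeWhile p) :: runsOf (cs'.dropWhile p) := by
      rw [runsOf_cons]
      simp only [gBA, hp, ← hg']
    simp only [hfold]
    simp only at hmain
    rw [hmain, hruns]
    simp
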